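-- pv_equiv track=rewrite | github.com/RautureauClement/AoC_2024 | day19_1.py | delStripes
-- ===== SOURCE A (Python) =====
-- def isPossible(strs, stripes):
--     if len(strs.replace('.', '')) == 0:
--         return True
--
--     for str in strs.split("."):
--         if str == '': continue
--         oneStripe = False
--         for stripe in stripes:
--             if stripe in str:
--                 oneStripe = isPossible(str.replace(stripe, '.', 1), stripes)
--                 if oneStripe: break
--
--         if not oneStripe:
--             return False
--
--     return True
--
-- def delStripes(stripes):
--     rm = []
--     for stripe in stripes:
--         subStripes = stripes.copy()
--         subStripes.remove(stripe)
--         if isPossible(stripe, subStripes):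
--             rm.append(stripe)
--
--     return sorted([x for x in stripes if not x in rm], key=len, reverse=True)
-- ===== SOURCE B (Python) =====
-- def delStripes(stripes):
--     counts = {}
--     for w in stripes:
--         counts[w] = counts.get(w, 0) + 1
--     vocab = set(w for w in stripes if w and '.' not in w)
--
--     def usable(w, s):
--         # is w in the vocabulary left after removing one occurrence of s?
--         return w in vocab and (w != s or counts[s] > 1)
--
--     def breaks(piece, s):
--         # word-break DP: ok[i] == piece[:i] is a concatenation of usable words
--         n = len(piece)
--         ok = [True]
--         for i in range(1, n + 1):
--             ok.append(any(ok[j] and usable(piece[j:i], s) for j in range(i)))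
--         return ok[n]
--
--     def removable(s):
--         return all(breaks(p, s) for p in s.split('.') if p)
--
--     keep = [x for x in stripes if not removable(x)]
--     return sorted(keep, key=len, reverse=True)
-- ===== Notes on version B (the rewrite author's own statement) =====
-- stated objective: faster
-- what changed: Per stripe, the exponential backtracking recursion over substring occurrences is replaced by a quadratic word-break DP table over the prefixes of each '.'-separated segment, with the vocabulary set and a duplicate counter precomputed once instead of rebuilding the sub-stripe pool per stripe.
-- outside the precondition, e.g. on delStripes(['']): A returns [], B returns []; on delStripes(['a', 'a', '']): A returns [], B returns []
import Mathlib
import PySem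

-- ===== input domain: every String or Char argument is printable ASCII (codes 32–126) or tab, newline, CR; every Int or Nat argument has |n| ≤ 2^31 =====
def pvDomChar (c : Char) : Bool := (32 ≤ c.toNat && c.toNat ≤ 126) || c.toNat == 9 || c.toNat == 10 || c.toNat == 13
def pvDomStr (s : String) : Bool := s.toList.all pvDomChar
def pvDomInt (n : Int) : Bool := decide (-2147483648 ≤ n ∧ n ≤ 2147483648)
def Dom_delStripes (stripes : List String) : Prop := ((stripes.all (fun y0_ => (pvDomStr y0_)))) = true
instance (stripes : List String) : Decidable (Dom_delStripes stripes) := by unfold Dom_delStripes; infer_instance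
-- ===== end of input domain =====

-- B replaces A's exponential backtracking per stripe by a quadratic word-break DP over each
-- '.'-separated segment (objective: faster); return values agree on Pre_ (no empty stripes).

-- ===== PORT A =====
-- hand port of Python's s.replace(old, new, 1) (PySem.Chars.replace has no count argument):
-- exact: CPython replaces the FIRST occurrence (found like str.find) or returns s unchanged.
def pyReplace1 (s old new : List Char) : List Char :=
  let i := PySem.Chars.find s old
  if i < 0 then s else s.take i.toNat ++ new ++ s.drop (i.toNat + old.length)

-- isPossible; fuel only makes the Python recursion total (Pre_ rules out the inputs where the
-- Python recursion diverges; on the rest the supplied fuel is proved sufficient).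
def isPossibleA : Nat → List Char → List (List Char) → Bool
  | 0, _, _ => false
  | fuel+1, strs, stripes =>
    if (PySem.Chars.replace strs ['.'] []).length == 0 then true
    else
      (PySem.Chars.splitOn strs ['.']).all fun str =>
        if str == ([] : List Char) then true
        else stripes.any fun stripe =>
          PySem.Chars.isIn stripe str && isPossibleA fuel (pyReplace1 str stripe ['.']) stripes

def delStripes (stripes : List String) : List String :=
  let rm := stripes.foldl (fun rm stripe =>
    let subStripes := (PySem.List.remove? stripes stripe).getD stripes  -- stripe ∈ stripes: remove succeeds
    if isPossibleA (stripe.toList.length + 1) stripe.toList (subStripes.map String.toList)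
    then rm ++ [stripe] else rm) []
  PySem.List.sorted (stripes.filter fun x => !(rm.contains x)) PySem.Str.len true

-- ===== PORT B =====
def goodWord (w : List Char) : Bool := w != [] && !(PySem.Chars.isIn ['.'] w)

def wordBreakDP (piece : List Char) (usable : List Char → Bool) : Bool :=
  let n : Int := piece.length
  let ok := (PySem.List.pyRange 1 (n+1)).foldl (fun ok i =>
      ok ++ [(PySem.List.pyRange 0 i).any fun j =>
        PySem.List.pyGetD ok j false && usable (PySem.List.slice piece (some j) (some i))]) [true]
  PySem.List.pyGetD ok n false

def removableB (counts : PySem.Dict String Int) (vocab : PySem.Set (List Char)) (s : String) :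
    Bool :=
  ((PySem.Chars.splitOn s.toList ['.']).filter fun p => p != ([] : List Char)).all
    fun p => wordBreakDP p fun w =>
      PySem.Set.contains vocab w && (w != s.toList || decide (1 < PySem.Dict.getD counts s 0))

def delStripes_alt (stripes : List String) : List String :=
  let counts := stripes.foldl (fun d w => d.insert w (d.getD w 0 + 1))
    (PySem.Dict.empty : PySem.Dict String Int)
  let vocab := PySem.Set.ofList ((stripes.map String.toList).filter goodWord)
  PySem.List.sorted (stripes.filter fun x => !(removableB counts vocab x)) PySem.Str.len true

-- ===== PRECONDITION & SPEC =====
-- Pre_ excludes lists containing the empty string: there Python A's recursion generally does not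
-- terminate (RecursionError); on the few such lists where A still returns, B returns the same value.
def Pre_delStripes (stripes : List String) : Prop := "" ∉ stripes
instance (stripes : List String) : Decidable (Pre_delStripes stripes) := by
  unfold Pre_delStripes; infer_instance
def pvWitness_delStripes : List String := ["ab", "a", "b"]
def Spec_delStripes (stripes : List String) (out : List String) : Prop := out = delStripes_alt stripes
instance (stripes : List String) (out : List String) : Decidable (Spec_delStripes stripes out) := by
  unfold Spec_delStripes; infer_instance

-- ===== CLAIM (what is proved, stated in full; the proofs are below) =====
def Claim_equal_delStripes : Prop := ∀ (stripes : List String), Dom_delStripes stripes → Pre_delStripes stripes → Spec_delStripes stripes (delStripes stripes)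

-- ===== LEMMAS AND PROOFS =====

-- the specification predicate: p is a concatenation of words of V
inductive WB (P : List Char → Prop) : List Char → Prop
  | nil : WB P []
  | cons {w v : List Char} : P w → WB P v → WB P (w ++ v)

-- number of non-'.' characters
def nondot (s : List Char) : Nat := (s.filter fun c => c != '.').length

theorem WB_append {P : List Char → Prop} {a b : List Char} (ha : WB P a) (hb : WB P b) :
    WB P (a ++ b) := by
  induction ha with
  | nil => simpa using hb
  | cons hw _ ih => rename_i w v; simpa using WB.cons hw ih

theorem WB_last {P : List Char → Prop} {t : List Char} (h : WB P t) (hne : t ≠ []) :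
    ∃ u w, t = u ++ w ∧ P w ∧ WB P u := by
  induction h with
  | nil => exact absurd rfl hne
  | cons hw hv ih =>
    rename_i w v
    by_cases hv0 : v = []
    · subst hv0; exact ⟨[], w, by simp, hw, WB.nil⟩
    · obtain ⟨u, w', rfl, hw', hu⟩ := ih hv0
      exact ⟨w ++ u, w', by simp, hw', WB.cons hw hu⟩

theorem WB_congr {P Q : List Char → Prop} (h : ∀ w, P w ↔ Q w) {p : List Char}
    (hp : WB P p) : WB Q p := by
  induction hp with
  | nil => exact WB.nil
  | cons hw _ ih => exact WB.cons ((h _).1 hw) ih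

-- ---- PySem.Chars.splitOn on separator '.' is List.splitOn '.' ----
theorem splitOnGo_eq (fuel : Nat) (l cur : List Char) (acc : List (List Char))
    (h : l.length ≤ fuel) :
    PySem.Chars.splitOn.go ['.'] fuel l cur acc
      = acc.reverse ++ List.modifyHead (cur.reverse ++ ·) (List.splitOnP (fun x => x == '.') l) := by
  induction fuel generalizing l cur acc with
  | zero =>
    have hl : l = [] := List.length_eq_zero_iff.1 (Nat.le_zero.1 h)
    subst hl
    simp [PySem.Chars.splitOn.go, List.splitOnP_nil]
  | succ fuel ih =>
    match l with
    | [] => simp [PySem.Chars.splitOn.go, List.splitOnP_nil]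
    | c :: rest =>
      by_cases hc : c = '.'
      · subst hc
        have hstep : PySem.Chars.splitOn.go ['.'] (fuel+1) ('.' :: rest) cur acc
            = PySem.Chars.splitOn.go ['.'] fuel rest [] (cur.reverse :: acc) := by
          have hp : List.isPrefixOf ['.'] ('.' :: rest) = true := by simp [List.isPrefixOf]
          simp [PySem.Chars.splitOn.go, hp]
        rw [hstep, ih rest [] (cur.reverse :: acc) (by simpa using Nat.le_of_succ_le_succ h)]
        rw [List.splitOnP_cons]
        simp only [beq_self_eq_true, if_pos]
        cases hsp : List.splitOnP (fun x => x == '.') rest with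
        | nil => exact absurd hsp (List.splitOnP_ne_nil _ _)
        | cons h1 t1 => simp [List.modifyHead]
      · have hstep : PySem.Chars.splitOn.go ['.'] (fuel+1) (c :: rest) cur acc
            = PySem.Chars.splitOn.go ['.'] fuel rest (c :: cur) acc := by
          have hp : List.isPrefixOf ['.'] (c :: rest) = false := by
            simp [List.isPrefixOf, Ne.symm hc]
          simp [PySem.Chars.splitOn.go, hp]
        rw [hstep, ih rest (c :: cur) acc (by simpa using Nat.le_of_succ_le_succ h)]
        rw [List.splitOnP_cons]
        simp only [show (c == '.') = false by simpa using hc, Bool.false_eq_true]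
        cases hsp : List.splitOnP (fun x => x == '.') rest with
        | nil => exact absurd hsp (List.splitOnP_ne_nil _ _)
        | cons h1 t1 => simp [List.modifyHead]

theorem charsSplitOn_eq (s : List Char) :
    PySem.Chars.splitOn s ['.'] = List.splitOn '.' s := by
  rw [PySem.Chars.splitOn, splitOnGo_eq _ _ _ _ (Nat.le_succ _), List.splitOn]
  cases hsp : List.splitOnP (fun x => x == '.') s with
  | nil => exact absurd hsp (List.splitOnP_ne_nil _ _)
  | cons h1 t1 => simp [List.modifyHead]

-- ---- PySem.Chars.replace s "." "" deletes the dots ----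
theorem replace_go_eq (fuel : Nat) (l acc : List Char) (h : l.length ≤ fuel) :
    PySem.Chars.replace.go ['.'] [] fuel l acc = acc.reverse ++ (l.filter fun c => c != '.') := by
  induction fuel generalizing l acc with
  | zero =>
    have hl : l = [] := List.length_eq_zero_iff.1 (Nat.le_zero.1 h)
    subst hl
    simp [PySem.Chars.replace.go]
  | succ fuel ih =>
    match l with
    | [] => simp [PySem.Chars.replace.go]
    | c :: rest =>
      by_cases hc : c = '.'
      · subst hc
        have hstep : PySem.Chars.replace.go ['.'] [] (fuel+1) ('.' :: rest) acc
            = PySem.Chars.replace.go ['.'] [] fuel rest acc := by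
          have hp : List.isPrefixOf ['.'] ('.' :: rest) = true := by simp [List.isPrefixOf]
          simp [PySem.Chars.replace.go, hp]
        rw [hstep, ih rest acc (by simpa using Nat.le_of_succ_le_succ h)]
        simp
      · have hstep : PySem.Chars.replace.go ['.'] [] (fuel+1) (c :: rest) acc
            = PySem.Chars.replace.go ['.'] [] fuel rest (c :: acc) := by
          have hp : List.isPrefixOf ['.'] (c :: rest) = false := by
            simp [List.isPrefixOf, Ne.symm hc]
          simp [PySem.Chars.replace.go, hp]
        rw [hstep, ih rest (c :: acc) (by simpa using Nat.le_of_succ_le_succ h)]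
        simp [hc]

theorem replace_dot_empty (s : List Char) :
    PySem.Chars.replace s ['.'] [] = s.filter fun c => c != '.' := by
  rw [PySem.Chars.replace]
  rw [if_neg (by simp)]
  simpa using replace_go_eq s.length s [] le_rfl

-- ---- facts about List.splitOnP (· == '.') ----
theorem splitOn_no_dot {s q : List Char} (h : q ∈ List.splitOnP (fun x => x == '.') s) :
    '.' ∉ q := by
  induction s generalizing q with
  | nil => rw [List.splitOnP_nil] at h; simp at h; subst h; simp
  | cons c rest ih =>
    rw [List.splitOnP_cons] at h
    by_cases hc : c = '.'
    · subst hc; simp at h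
      rcases h with h | h
      · subst h; simp
      · exact ih h
    · simp only [show (c == '.') = false by simpa using hc, Bool.false_eq_true] at h
      cases hsp : List.splitOnP (fun x => x == '.') rest with
      | nil => exact absurd hsp (List.splitOnP_ne_nil _ _)
      | cons h1 t1 =>
        rw [hsp] at h
        have h2 : q = c :: h1 ∨ q ∈ t1 := by simpa [List.modifyHead] using h
        rcases h2 with h2 | h2
        · subst h2
          intro hmem
          rcases List.mem_cons.1 hmem with h' | h'
          · exact hc h'.symm
          · exact ih (q := h1) (by simp [hsp]) h'
        · exact ih (by rw [hsp]; exact List.mem_cons_of_mem _ h2)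

theorem splitOn_length_le {s q : List Char} (h : q ∈ List.splitOnP (fun x => x == '.') s) :
    q.length ≤ nondot s := by
  induction s generalizing q with
  | nil => rw [List.splitOnP_nil] at h; simp at h; subst h; simp
  | cons c rest ih =>
    rw [List.splitOnP_cons] at h
    by_cases hc : c = '.'
    · subst hc; simp at h
      rcases h with h | h
      · subst h; simp
      · exact le_trans (ih h) (by simp [nondot])
    · simp only [show (c == '.') = false by simpa using hc, Bool.false_eq_true] at h
      have hnd : nondot (c :: rest) = nondot rest + 1 := by
        simp [nondot, List.filter, show (c != '.') = true by simpa using hc]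
      cases hsp : List.splitOnP (fun x => x == '.') rest with
      | nil => exact absurd hsp (List.splitOnP_ne_nil _ _)
      | cons h1 t1 =>
        rw [hsp] at h
        have h2 : q = c :: h1 ∨ q ∈ t1 := by simpa [List.modifyHead] using h
        rcases h2 with h2 | h2
        · subst h2
          have : h1.length ≤ nondot rest := ih (by simp [hsp])
          simpa [hnd] using Nat.succ_le_succ this
        · have : q.length ≤ nondot rest := ih (by rw [hsp]; exact List.mem_cons_of_mem _ h2)
          omega

theorem splitOn_eq_self {q : List Char} (h : '.' ∉ q) :
    List.splitOnP (fun x => x == '.') q = [q] := by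
  induction q with
  | nil => simp [List.splitOnP_nil]
  | cons c rest ih =>
    have hc : c ≠ '.' := fun hh => h (hh ▸ List.mem_cons_self ..)
    have hrest : '.' ∉ rest := fun hh => h (List.mem_cons_of_mem _ hh)
    rw [List.splitOnP_cons]
    simp only [show (c == '.') = false by simpa using hc, Bool.false_eq_true]
    rw [ih hrest]
    simp [List.modifyHead]

theorem splitOn_append_dot (u v : List Char) :
    List.splitOnP (fun x => x == '.') (u ++ '.' :: v)
      = List.splitOnP (fun x => x == '.') u ++ List.splitOnP (fun x => x == '.') v := by
  induction u with
  | nil => simp [List.splitOnP_cons, List.splitOnP_nil]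
  | cons c rest ih =>
    by_cases hc : c = '.'
    · subst hc
      simp only [List.cons_append, List.splitOnP_cons, beq_self_eq_true, if_pos, ih]
    · simp only [List.cons_append, List.splitOnP_cons,
        show (c == '.') = false by simpa using hc, Bool.false_eq_true, ih]
      cases hsp : List.splitOnP (fun x => x == '.') rest with
      | nil => exact absurd hsp (List.splitOnP_ne_nil _ _)
      | cons h1 t1 => simp [List.modifyHead]

-- ---- pyReplace1 facts ----
theorem pyReplace1_spec {p w : List Char} (h : PySem.Chars.isIn w p = true) :
    ∃ u v, p = u ++ w ++ v ∧ pyReplace1 p w ['.'] = u ++ '.' :: v := by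
  have hinf := (PySem.Chars.isIn_iff_infix w p).1 h
  have hnn : 0 ≤ PySem.Chars.find p w := (PySem.Chars.find_nonneg_iff p w).2 hinf
  obtain ⟨hpre, -⟩ := PySem.Chars.find_spec hnn
  obtain ⟨t, ht⟩ := hpre
  refine ⟨p.take (PySem.Chars.find p w).toNat,
          p.drop ((PySem.Chars.find p w).toNat + w.length), ?_, ?_⟩
  · have ht2 : p.drop ((PySem.Chars.find p w).toNat + w.length) = t := by
      rw [← List.drop_drop, ← ht]
      simp
    have hdrop : p.drop (PySem.Chars.find p w).toNat
        = w ++ p.drop ((PySem.Chars.find p w).toNat + w.length) := by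
      rw [ht2, ht]
    calc p = p.take (PySem.Chars.find p w).toNat ++ p.drop (PySem.Chars.find p w).toNat :=
            (List.take_append_drop _ p).symm
      _ = _ := by rw [hdrop, ← List.append_assoc]
  · rw [pyReplace1]
    rw [if_neg (not_lt.2 hnn)]
    simp

theorem pyReplace1_of_prefix {p w : List Char} (hp : w <+: p) :
    pyReplace1 p w ['.'] = '.' :: p.drop w.length := by
  have hinf : w <:+: p := hp.isInfix
  have hnn : 0 ≤ PySem.Chars.find p w := (PySem.Chars.find_nonneg_iff p w).2 hinf
  obtain ⟨-, hfirst⟩ := PySem.Chars.find_spec hnn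
  have hzero : (PySem.Chars.find p w).toNat = 0 := by
    by_contra hne
    exact hfirst 0 (Nat.pos_of_ne_zero hne) (by simpa using hp)
  rw [pyReplace1]
  rw [if_neg (not_lt.2 hnn), hzero]
  simp

-- single-character infix is membership
theorem singleton_infix_iff {a : Char} {l : List Char} : [a] <:+: l ↔ a ∈ l := by
  constructor
  · intro h; exact h.subset (by simp)
  · intro h
    obtain ⟨s, t, rfl⟩ := List.append_of_mem h
    exact ⟨s, t, by simp⟩

theorem nondot_append (a b : List Char) : nondot (a ++ b) = nondot a + nondot b := by
  simp [nondot, List.filter_append]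

theorem nondot_of_no_dot {q : List Char} (h : '.' ∉ q) : nondot q = q.length := by
  unfold nondot
  rw [List.filter_eq_self.2]
  intro a ha
  have : a ≠ '.' := fun hh => h (hh ▸ ha)
  simpa using this

-- ---- A-side: isPossibleA decides segment-wise word-breakability ----
theorem isPossibleA_iff (fuel : Nat) (s : List Char) (P : List (List Char))
    (hP : ∀ w ∈ P, w ≠ []) (hfuel : nondot s < fuel) :
    (isPossibleA fuel s P = true
      ↔ ∀ p ∈ List.splitOnP (fun x => x == '.') s, p ≠ [] → WB (· ∈ P.filter goodWord) p) := by
  induction fuel generalizing s with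
  | zero => omega
  | succ fuel ih =>
    simp only [isPossibleA, replace_dot_empty]
    by_cases hz : nondot s = 0
    · rw [if_pos (by simpa [nondot] using hz)]
      simp only [true_iff]
      intro p hp hpne
      have := splitOn_length_le hp
      rw [hz, Nat.le_zero, List.length_eq_zero_iff] at this
      exact absurd this hpne
    · rw [if_neg (by simpa [nondot] using hz)]
      rw [charsSplitOn_eq, List.all_eq_true]
      have hpt : ∀ p ∈ List.splitOnP (fun x => x == '.') s, p ≠ [] →
          ((P.any fun w =>
              PySem.Chars.isIn w p && isPossibleA fuel (pyReplace1 p w ['.']) P) = true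
            ↔ WB (· ∈ P.filter goodWord) p) := by
        intro p hp hpne
        have hpdot : '.' ∉ p := splitOn_no_dot hp
        have hple : p.length ≤ nondot s := by
          have := splitOn_length_le hp
          omega
        constructor
        · rw [List.any_eq_true]
          rintro ⟨w, hwP, hand⟩
          rw [Bool.and_eq_true] at hand
          obtain ⟨hin, hrec⟩ := hand
          obtain ⟨u, v, hpuv, hrepl⟩ := pyReplace1_spec hin
          have hwne : w ≠ [] := hP w hwP
          have hwsub : ∀ c ∈ w, c ∈ p := fun c hc => hpuv ▸ (by simp [hc])
          have hwdot : ¬ PySem.Chars.isIn ['.'] w = true := by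
            rw [PySem.Chars.isIn_iff_infix, singleton_infix_iff]
            exact fun hh => hpdot (hwsub _ hh)
          have hgood : goodWord w = true := by
            simp [goodWord, hwne, hwdot]
          have hudot : '.' ∉ u := fun hh => hpdot (hpuv ▸ (by simp [hh]))
          have hvdot : '.' ∉ v := fun hh => hpdot (hpuv ▸ (by simp [hh]))
          have hlen : u.length + w.length + v.length = p.length := by
            rw [hpuv]; simp only [List.length_append]
          have hwpos : 0 < w.length := List.length_pos_iff.2 hwne
          have hnda : nondot (u ++ '.' :: v) < fuel := by
            have h1 : nondot (u ++ '.' :: v) = u.length + v.length := by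
              rw [nondot_append, nondot_of_no_dot hudot]
              have : nondot ('.' :: v) = nondot v := by simp [nondot, List.filter]
              rw [this, nondot_of_no_dot hvdot]
            omega
          rw [hrepl] at hrec
          have hpieces := (ih (u ++ '.' :: v) hnda).1 hrec
          rw [splitOn_append_dot, splitOn_eq_self hudot, splitOn_eq_self hvdot] at hpieces
          have hu : WB (· ∈ P.filter goodWord) u := by
            by_cases hu0 : u = []
            · subst hu0; exact WB.nil
            · exact hpieces u (by simp) hu0
          have hv : WB (· ∈ P.filter goodWord) v := by
            by_cases hv0 : v = []
            · subst hv0; exact WB.nil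
            · exact hpieces v (by simp) hv0
          rw [hpuv, List.append_assoc]
          exact WB_append hu (WB.cons (List.mem_filter.2 ⟨hwP, hgood⟩) hv)
        · intro hWB
          cases hWB with
          | nil => exact absurd rfl hpne
          | cons hwmem hv =>
            rename_i w v
            obtain ⟨hwP, hgood⟩ := List.mem_filter.1 hwmem
            have hwne : w ≠ [] := hP w hwP
            have hwpre : w <+: w ++ v := List.prefix_append w v
            rw [List.any_eq_true]
            refine ⟨w, hwP, ?_⟩
            rw [Bool.and_eq_true]
            refine ⟨(PySem.Chars.isIn_iff_infix _ _).2 hwpre.isInfix, ?_⟩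
            rw [pyReplace1_of_prefix hwpre, List.drop_left]
            have hvdot : '.' ∉ v := fun hh => hpdot (by simp [hh])
            have hwpos : 0 < w.length := List.length_pos_iff.2 hwne
            have hnda : nondot ('.' :: v) < fuel := by
              have h1 : nondot ('.' :: v) = v.length := by
                have : nondot ('.' :: v) = nondot v := by simp [nondot, List.filter]
                rw [this, nondot_of_no_dot hvdot]
              have h2 : v.length + w.length ≤ nondot s := by
                have : (w ++ v).length ≤ nondot s := hple
                simpa [Nat.add_comm] using this
              omega
            rw [ih ('.' :: v) hnda]
            have hsplit : List.splitOnP (fun x => x == '.') ('.' :: v)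
                = [[]] ++ [v] := by
              have h0 := splitOn_append_dot [] v
              rw [List.nil_append] at h0
              rw [h0, List.splitOnP_nil, splitOn_eq_self hvdot]
            rw [hsplit]
            intro q hq hqne
            have hq2 : q = [] ∨ q = v := by simpa using hq
            rcases hq2 with rfl | rfl
            · exact absurd rfl hqne
            · exact hv
      constructor
      · intro hall p hp hpne
        have := hall p hp
        rw [if_neg (by simpa using hpne)] at this
        exact (hpt p hp hpne).1 this
      · intro hWB p hp
        by_cases hpne : p = []
        · rw [if_pos (by simpa using hpne)]
        · rw [if_neg (by simpa using hpne)]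
          exact (hpt p hp hpne).2 (hWB p hp hpne)

-- remove? followed by getD is List.erase
theorem remove?_getD_erase (l : List String) (x : String) :
    (PySem.List.remove? l x).getD l = l.erase x := by
  rw [PySem.List.remove?, List.erase_eq_eraseIdx]
  cases List.idxOf? x l <;> simp

theorem mem_erase_iff_count {y x : String} {l : List String} :
    y ∈ l.erase x ↔ y ∈ l ∧ (y ≠ x ∨ 2 ≤ l.count x) := by
  by_cases hyx : y = x
  · subst hyx
    constructor
    · intro h
      have h1 : 0 < List.count y (l.erase y) := List.count_pos_iff.2 h
      rw [List.count_erase_self] at h1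
      exact ⟨List.count_pos_iff.1 (by omega), Or.inr (by omega)⟩
    · rintro ⟨h1, h2⟩
      rcases h2 with h2 | h2
      · exact absurd rfl h2
      · refine List.count_pos_iff.1 ?_
        rw [List.count_erase_self]
        omega
  · simp [List.mem_erase_of_ne hyx, hyx]

-- ---- B-side: the DP decides word-breakability ----
theorem wordBreakDP_iff (piece : List Char) (usable : List Char → Bool)
    (hV : ∀ w, usable w = true → w ≠ []) :
    (wordBreakDP piece usable = true ↔ WB (fun w => usable w = true) piece) := by
  have inv : ∀ m : Nat, m ≤ piece.length →
      (((PySem.List.pyRange 1 ((m : Int) + 1)).foldl (fun ok i =>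
          ok ++ [(PySem.List.pyRange 0 i).any fun j =>
            PySem.List.pyGetD ok j false &&
              usable (PySem.List.slice piece (some j) (some i))]) [true]).length
          = m + 1
        ∧ ∀ k : Nat, k ≤ m →
            (((PySem.List.pyRange 1 ((m : Int) + 1)).foldl (fun ok i =>
                ok ++ [(PySem.List.pyRange 0 i).any fun j =>
                  PySem.List.pyGetD ok j false &&
                    usable (PySem.List.slice piece (some j) (some i))]) [true]).getD
                k false = true
              ↔ WB (fun w => usable w = true) (piece.take k))) := by
    intro m
    induction m with
    | zero =>
      intro _
      rw [PySem.List.pyRange_one_eq_nil (by norm_num)]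
      refine ⟨by simp, ?_⟩
      intro k hk
      interval_cases k
      simp only [List.foldl_nil, List.getD_cons_zero, List.take_zero]
      refine ⟨fun _ => WB.nil, fun _ => ?_⟩
      simp
    | succ m ihm =>
      intro hm
      obtain ⟨ihlen, ihget⟩ := ihm (by omega)
      have hsplit : PySem.List.pyRange 1 (((m + 1 : Nat) : Int) + 1)
          = PySem.List.pyRange 1 ((m : Int) + 1) ++ [((m + 1 : Nat) : Int)] := by
        rw [PySem.List.pyRange_one_append 1 ((m : Int) + 1) (((m + 1 : Nat) : Int) + 1)
            (by omega) (by push_cast; omega)]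
        congr 1
        rw [PySem.List.pyRange_one_cons (by push_cast; omega),
            PySem.List.pyRange_one_eq_nil (by push_cast; omega)]
        push_cast; norm_num
      rw [hsplit, List.foldl_append, List.foldl_cons, List.foldl_nil]
      set okm := (PySem.List.pyRange 1 ((m : Int) + 1)).foldl (fun ok i =>
          ok ++ [(PySem.List.pyRange 0 i).any fun j =>
            PySem.List.pyGetD ok j false &&
              usable (PySem.List.slice piece (some j) (some i))]) [true] with hokm
      set b := (PySem.List.pyRange 0 ((m + 1 : Nat) : Int)).any fun j =>
          PySem.List.pyGetD okm j false &&
            usable (PySem.List.slice piece (some j) (some ((m + 1 : Nat) : Int)))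
        with hb
      have hblen : (okm ++ [b]).length = m + 2 := by simp [ihlen]
      refine ⟨by simpa using hblen, ?_⟩
      have hbiff : b = true ↔ WB (fun w => usable w = true) (piece.take (m + 1)) := by
        rw [hb, List.any_eq_true]
        constructor
        · rintro ⟨j, hjmem, hj⟩
          rw [PySem.List.mem_pyRange_one] at hjmem
          obtain ⟨hj0, hjlt⟩ := hjmem
          rw [Bool.and_eq_true] at hj
          obtain ⟨hok, hcont⟩ := hj
          have hjn : j = ((j.toNat : Nat) : Int) := (Int.toNat_of_nonneg hj0).symm
          have hjle : j.toNat ≤ m := by omega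
          rw [hjn, PySem.List.pyGetD_natCast] at hok
          have hu : WB (fun w => usable w = true) (piece.take j.toNat) :=
            (ihget j.toNat hjle).1 hok
          rw [hjn, PySem.List.slice_natCast] at hcont
          have htake : piece.take (m + 1)
              = piece.take j.toNat ++ (piece.drop j.toNat).take (m + 1 - j.toNat) := by
            rw [← List.take_add]
            congr 1
            omega
          rw [htake]
          exact WB_append hu (by simpa using WB.cons hcont WB.nil)
        · intro hWB
          have htne : piece.take (m + 1) ≠ [] := by
            have : (piece.take (m + 1)).length = m + 1 := by
              rw [List.length_take]; omega
            intro hh; rw [hh] at this; simp at this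
          obtain ⟨u, w, huw, hwV, hu⟩ := WB_last hWB htne
          have hwne : w ≠ [] := hV w hwV
          have hwpos : 0 < w.length := List.length_pos_iff.2 hwne
          have hulen : u.length + w.length = m + 1 := by
            have : (piece.take (m + 1)).length = m + 1 := by
              rw [List.length_take]; omega
            rw [huw] at this; simpa using this
          refine ⟨((u.length : Nat) : Int), ?_, ?_⟩
          · rw [PySem.List.mem_pyRange_one]
            constructor
            · positivity
            · push_cast; omega
          · rw [Bool.and_eq_true]
            constructor
            · rw [PySem.List.pyGetD_natCast]
              have hpre : u <+: piece.take (m + 1) := ⟨w, huw.symm⟩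
              have hpre2 : u <+: piece := hpre.trans (List.take_prefix _ _)
              have huval : u = piece.take u.length := List.prefix_iff_eq_take.1 hpre2
              exact (ihget u.length (by omega)).2 (huval ▸ hu)
            · rw [PySem.List.slice_natCast]
              have hw : (piece.drop u.length).take (m + 1 - u.length) = w := by
                rw [← List.drop_take, huw]
                exact List.drop_left
              rw [hw]
              exact hwV
      intro k hk
      by_cases hkm : k ≤ m
      · rw [List.getD_eq_getElem?_getD, List.getElem?_append_left (by omega),
            ← List.getD_eq_getElem?_getD]
        exact ihget k hkm
      · have hkeq : k = m + 1 := by omega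
        subst hkeq
        rw [List.getD_eq_getElem?_getD, List.getElem?_append_right (by omega), ihlen]
        simpa using hbiff
  obtain ⟨-, hget⟩ := inv piece.length le_rfl
  rw [wordBreakDP]
  rw [show ((piece.length : Int)) = ((piece.length : Nat) : Int) by norm_num,
      PySem.List.pyGetD_natCast]
  have := hget piece.length le_rfl
  rwa [List.take_length] at this

-- ---- per-value agreement ----
theorem removable_agree (stripes : List String) (hpre : "" ∉ stripes) (x : String) :
    isPossibleA (x.toList.length + 1) x.toList
        (((PySem.List.remove? stripes x).getD stripes).map String.toList)
      = removableB
          (stripes.foldl (fun d w => d.insert w (d.getD w 0 + 1))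
            (PySem.Dict.empty : PySem.Dict String Int))
          (PySem.Set.ofList ((stripes.map String.toList).filter goodWord)) x := by
  rw [remove?_getD_erase]
  have hP : ∀ w ∈ (stripes.erase x).map String.toList, w ≠ [] := by
    intro w hw
    obtain ⟨y, hy, rfl⟩ := List.mem_map.1 hw
    intro hnil
    have hyempty : y = "" := by
      rw [← String.toList_inj]
      simpa using hnil
    exact hpre (hyempty ▸ (List.erase_sublist).subset hy)
  have hfuel : nondot x.toList < x.toList.length + 1 := by
    have : nondot x.toList ≤ x.toList.length := List.length_filter_le _ _
    omega
  have hA := isPossibleA_iff (x.toList.length + 1) x.toList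
    ((stripes.erase x).map String.toList) hP hfuel
  have hcount : PySem.Dict.getD (stripes.foldl (fun d w => d.insert w (d.getD w 0 + 1))
      (PySem.Dict.empty : PySem.Dict String Int)) x 0 = (stripes.count x : Int) := by
    rw [PySem.Dict.foldl_insert_getD_add_one_eq_counter, PySem.Dict.getD_counter]
  have husable : ∀ w : List Char,
      ((PySem.Set.contains (PySem.Set.ofList ((stripes.map String.toList).filter goodWord)) w
          && (w != x.toList ||
              decide (1 < PySem.Dict.getD (stripes.foldl (fun d w => d.insert w (d.getD w 0 + 1))
                (PySem.Dict.empty : PySem.Dict String Int)) x 0))) = true)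
        ↔ w ∈ ((stripes.erase x).map String.toList).filter goodWord := by
    intro w
    rw [Bool.and_eq_true, Bool.or_eq_true, bne_iff_ne, decide_eq_true_eq, hcount]
    rw [PySem.Set.contains, List.contains_eq_mem, decide_eq_true_eq, PySem.Set.mem_ofList]
    have hcast : ((1 : Int) < (stripes.count x : Int)) ↔ 2 ≤ stripes.count x := by
      constructor <;> intro h <;> omega
    rw [hcast]
    constructor
    · rintro ⟨hmemv, hor⟩
      obtain ⟨hmapmem, hgood⟩ := List.mem_filter.1 hmemv
      obtain ⟨y, hy, rfl⟩ := List.mem_map.1 hmapmem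
      have hyE : y ∈ stripes.erase x := by
        rw [mem_erase_iff_count]
        refine ⟨hy, ?_⟩
        rcases hor with hor | hor
        · exact Or.inl (fun hh => hor (by rw [hh]))
        · exact Or.inr hor
      exact List.mem_filter.2 ⟨List.mem_map.2 ⟨y, hyE, rfl⟩, hgood⟩
    · intro h
      obtain ⟨hmapmem, hgood⟩ := List.mem_filter.1 h
      obtain ⟨y, hyE, rfl⟩ := List.mem_map.1 hmapmem
      obtain ⟨hy, hor⟩ := mem_erase_iff_count.1 hyE
      refine ⟨List.mem_filter.2 ⟨List.mem_map.2 ⟨y, hy, rfl⟩, hgood⟩, ?_⟩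
      rcases hor with hor | hor
      · exact Or.inl (fun hh => hor (String.toList_inj.1 hh))
      · exact Or.inr hor
  have husable_ne : ∀ w : List Char,
      ((PySem.Set.contains (PySem.Set.ofList ((stripes.map String.toList).filter goodWord)) w
          && (w != x.toList ||
              decide (1 < PySem.Dict.getD (stripes.foldl (fun d w => d.insert w (d.getD w 0 + 1))
                (PySem.Dict.empty : PySem.Dict String Int)) x 0))) = true) → w ≠ [] := by
    intro w hw
    have := (List.mem_filter.1 ((husable w).1 hw)).2
    simp only [goodWord, Bool.and_eq_true, bne_iff_ne, ne_eq] at this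
    exact this.1
  have hB : removableB
        (stripes.foldl (fun d w => d.insert w (d.getD w 0 + 1))
          (PySem.Dict.empty : PySem.Dict String Int))
        (PySem.Set.ofList ((stripes.map String.toList).filter goodWord)) x = true
      ↔ ∀ p ∈ List.splitOnP (fun x => x == '.') x.toList, p ≠ [] →
          WB (· ∈ ((stripes.erase x).map String.toList).filter goodWord) p := by
    simp only [removableB, charsSplitOn_eq, List.all_eq_true]
    constructor
    · intro h p hp hpne
      have h2 := h p (List.mem_filter.2 ⟨hp, by simpa using hpne⟩)
      have hwb := (wordBreakDP_iff p _ husable_ne).1 h2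
      exact WB_congr (fun w => husable w) hwb
    · intro h p hp
      have hp1 := (List.mem_filter.1 hp).1
      have hp2 := (List.mem_filter.1 hp).2
      rw [wordBreakDP_iff p _ husable_ne]
      exact WB_congr (fun w => (husable w).symm) (h p hp1 (by simpa using hp2))
  rw [Bool.eq_iff_iff, hA, hB]

theorem filter_rm_eq (stripes : List String) (hpre : "" ∉ stripes) :
    (stripes.filter fun x =>
        !((stripes.foldl (fun rm stripe =>
            if isPossibleA (stripe.toList.length + 1) stripe.toList
                (((PySem.List.remove? stripes stripe).getD stripes).map String.toList)
            then rm ++ [stripe] else rm) []).contains x))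
      = stripes.filter fun x =>
          !(removableB
            (stripes.foldl (fun d w => d.insert w (d.getD w 0 + 1))
              (PySem.Dict.empty : PySem.Dict String Int))
            (PySem.Set.ofList ((stripes.map String.toList).filter goodWord)) x) := by
  have hrm : (stripes.foldl (fun rm stripe =>
      if isPossibleA (stripe.toList.length + 1) stripe.toList
          (((PySem.List.remove? stripes stripe).getD stripes).map String.toList)
      then rm ++ [stripe] else rm) [])
      = stripes.filter fun stripe =>
          isPossibleA (stripe.toList.length + 1) stripe.toList
            (((PySem.List.remove? stripes stripe).getD stripes).map String.toList) := by
    have := PySem.List.foldl_append_if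
      (fun stripe => isPossibleA (stripe.toList.length + 1) stripe.toList
        (((PySem.List.remove? stripes stripe).getD stripes).map String.toList))
      (id : String → String) stripes []
    simpa using this
  rw [hrm]
  apply List.filter_congr
  intro x hxmem
  have key := removable_agree stripes hpre x
  have hcontains : (stripes.filter fun stripe =>
      isPossibleA (stripe.toList.length + 1) stripe.toList
        (((PySem.List.remove? stripes stripe).getD stripes).map String.toList)).contains x
      = removableB
          (stripes.foldl (fun d w => d.insert w (d.getD w 0 + 1))
            (PySem.Dict.empty : PySem.Dict String Int))
          (PySem.Set.ofList ((stripes.map String.toList).filter goodWord)) x := by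
    rw [List.contains_eq_mem]
    cases hb : removableB
        (stripes.foldl (fun d w => d.insert w (d.getD w 0 + 1))
          (PySem.Dict.empty : PySem.Dict String Int))
        (PySem.Set.ofList ((stripes.map String.toList).filter goodWord)) x with
    | false =>
      simp only [decide_eq_false_iff_not, List.mem_filter, not_and]
      intro _ hA
      rw [key, hb] at hA
      exact absurd hA (by simp)
    | true =>
      simp only [decide_eq_true_eq, List.mem_filter]
      exact ⟨hxmem, key.trans hb⟩
  rw [hcontains]

-- ===== VERDICT (by name: the statement is the Claim_ definition above) =====
theorem delStripes_spec : Claim_equal_delStripes := by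
  intro stripes _ hpre
  unfold Spec_delStripes
  exact congrArg (fun l => PySem.List.sorted l PySem.Str.len true) (filter_rm_eq stripes hpre)
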